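-- pv_equiv track=rewrite | github.com/silous888/VLR_patchFrAuto | steam.py | extraire_path_dans_ligne
-- ===== SOURCE A (Python) =====
-- def extraire_path_dans_ligne(ligne):
--     """récupère le path de la steamlibrary de la ligne du fichier libraryfolders.vdf
--                 "path"		"F:\\SteamLibrary"
--     la ligne se présente comme ceci, on récupère le string situé entre les 3ème et 4ème guillemets
--
--     Args:
--         ligne (str): ligne de libraryfolders.vdf où est le situé le chemin de la steamlibrary
--
--     Returns:
--         int, int: début et fin de la sous-chaine de la ligne présentant le chemin de la steamlibrary
--     """
--     compteur_apostrophes = 0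
--     index_debut = 0
--     index_fin = 0
--     for index, caractere in enumerate(ligne):
--         if caractere == '"':
--             compteur_apostrophes += 1
--             if compteur_apostrophes == 3:
--                 index_debut = index + 1
--             if compteur_apostrophes == 4:
--                 index_fin = index
--     return index_debut, index_fin
-- ===== SOURCE B (Python) =====
-- def extraire_path_dans_ligne(ligne):
--     q1 = ligne.find('"')
--     q2 = ligne.find('"', q1 + 1) if q1 != -1 else -1
--     q3 = ligne.find('"', q2 + 1) if q2 != -1 else -1
--     q4 = ligne.find('"', q3 + 1) if q3 != -1 else -1
--     index_debut = q3 + 1 if q3 != -1 else 0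
--     index_fin = q4 if q4 != -1 else 0
--     return index_debut, index_fin
-- ===== Notes on version B (the rewrite author's own statement) =====
-- stated objective: idiomatic
-- what changed: Replaces the single enumerate pass with a running quote counter by a chain of four str.find calls that thread a moving cursor from one quote to the next, mapping an absent quote (-1) back to the default 0.
import Mathlib
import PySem

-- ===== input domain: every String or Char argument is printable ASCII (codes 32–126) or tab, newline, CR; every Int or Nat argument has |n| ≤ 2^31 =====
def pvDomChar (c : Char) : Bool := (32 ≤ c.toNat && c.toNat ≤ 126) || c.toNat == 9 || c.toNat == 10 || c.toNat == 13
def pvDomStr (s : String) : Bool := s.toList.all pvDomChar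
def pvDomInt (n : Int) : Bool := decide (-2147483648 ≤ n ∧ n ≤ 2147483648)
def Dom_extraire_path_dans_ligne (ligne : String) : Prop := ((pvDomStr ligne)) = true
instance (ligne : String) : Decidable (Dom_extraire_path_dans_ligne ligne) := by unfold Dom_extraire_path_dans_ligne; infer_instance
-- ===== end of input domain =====

-- B replaces A's single enumerate-with-counter pass by a guarded chain of str.find calls
-- locating the 1st..4th quotes with a moving cursor (objective: idiomatic; measured constant-factor faster).

-- ===== PORT A =====
def extraire_path_dans_ligne (ligne : String) : Int × Int :=
  let final := (PySem.List.enumerate ligne.toList).foldl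
    (fun (st : Int × Int × Int) (ic : Int × Char) =>
      if ic.2 == '"' then
        let compteur := st.1 + 1
        let debut := if compteur == 3 then ic.1 + 1 else st.2.1
        let fin := if compteur == 4 then ic.1 else st.2.2
        (compteur, debut, fin)
      else st)
    (0, 0, 0)
  (final.2.1, final.2.2)

-- ===== PORT B =====
def extraire_path_dans_ligne_alt (ligne : String) : Int × Int :=
  let q1 := PySem.Str.find ligne "\""
  let q2 := if q1 != -1 then PySem.Str.findFrom ligne "\"" (q1 + 1) none else -1
  let q3 := if q2 != -1 then PySem.Str.findFrom ligne "\"" (q2 + 1) none else -1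
  let q4 := if q3 != -1 then PySem.Str.findFrom ligne "\"" (q3 + 1) none else -1
  (if q3 != -1 then q3 + 1 else 0, if q4 != -1 then q4 else 0)

-- ===== PRECONDITION & SPEC =====
def Spec_extraire_path_dans_ligne (ligne : String) (out : Int × Int) : Prop := out = extraire_path_dans_ligne_alt ligne
instance (ligne : String) (out : Int × Int) : Decidable (Spec_extraire_path_dans_ligne ligne out) := by unfold Spec_extraire_path_dans_ligne; infer_instance

-- ===== CLAIM (what is proved, stated in full; the proofs are below) =====
def Claim_equal_extraire_path_dans_ligne : Prop := ∀ (ligne : String), Dom_extraire_path_dans_ligne ligne → Spec_extraire_path_dans_ligne ligne (extraire_path_dans_ligne ligne)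

-- ===== LEMMAS AND PROOFS =====

/-- Indices (absolute, starting at offset `i`) of the `"` characters of `l`. -/
def quoteIdxs : List Char → Nat → List Nat
  | [], _ => []
  | c :: t, i => if c = '"' then i :: quoteIdxs t (i + 1) else quoteIdxs t (i + 1)

/-- Common characterization of both ports. -/
def specOf (P : List Nat) : Int × Int :=
  (((P[2]? : Option Nat).map (fun p => (p : Int) + 1)).getD 0, ((P[3]? : Option Nat).map (fun p => (p : Int))).getD 0)

theorem quoteIdxs_ge : ∀ (l : List Char) (i : Nat), ∀ q ∈ quoteIdxs l i, i ≤ q := by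
  intro l
  induction l with
  | nil => intro i q hq; simp [quoteIdxs] at hq
  | cons c t ih =>
    intro i q hq
    simp only [quoteIdxs] at hq
    split at hq
    · rcases List.mem_cons.mp hq with h | h
      · omega
      · have := ih (i + 1) q h; omega
    · have := ih (i + 1) q hq; omega

theorem quoteIdxs_lt : ∀ (l : List Char) (i : Nat), ∀ q ∈ quoteIdxs l i, q < i + l.length := by
  intro l
  induction l with
  | nil => intro i q hq; simp [quoteIdxs] at hq
  | cons c t ih =>
    intro i q hq
    simp only [quoteIdxs] at hq
    simp only [List.length_cons]
    split at hq
    · rcases List.mem_cons.mp hq with h | h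
      · omega
      · have := ih (i + 1) q h; omega
    · have := ih (i + 1) q hq; omega

theorem quoteIdxs_sorted : ∀ (l : List Char) (i : Nat), (quoteIdxs l i).Pairwise (· < ·) := by
  intro l
  induction l with
  | nil => intro i; simp [quoteIdxs]
  | cons c t ih =>
    intro i
    simp only [quoteIdxs]
    split
    · exact List.pairwise_cons.mpr ⟨fun q hq => by have := quoteIdxs_ge t (i + 1) q hq; omega, ih (i + 1)⟩
    · exact ih (i + 1)

theorem quoteIdxs_shift : ∀ (l : List Char) (i j : Nat),
    quoteIdxs l (i + j) = (quoteIdxs l j).map (· + i) := by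
  intro l
  induction l with
  | nil => intro i j; simp [quoteIdxs]
  | cons c t ih =>
    intro i j
    simp only [quoteIdxs]
    split
    · have := ih i (j + 1)
      simp only [List.map_cons]
      rw [show i + j + 1 = i + (j + 1) by omega, this, show i + j = j + i by omega]
    · rw [show i + j + 1 = i + (j + 1) by omega, ih i (j + 1)]

theorem quoteIdxs_drop : ∀ (l : List Char) (i k : Nat),
    quoteIdxs (l.drop k) (i + k) = (quoteIdxs l i).dropWhile (fun q => decide (q < i + k)) := by
  intro l
  induction l with
  | nil => intro i k; simp [quoteIdxs]
  | cons c t ih =>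
    intro i k
    cases k with
    | zero =>
      simp only [List.drop_zero, Nat.add_zero]
      symm
      apply List.dropWhile_eq_self_iff.mpr
      intro h
      have hmem : (quoteIdxs (c :: t) i)[0] ∈ quoteIdxs (c :: t) i := List.getElem_mem h
      have := quoteIdxs_ge (c :: t) i _ hmem
      simp only [decide_eq_true_eq]
      omega
    | succ k' =>
      simp only [List.drop_succ_cons]
      have h1 : i + (k' + 1) = (i + 1) + k' := by omega
      rw [h1, ih (i + 1) k']
      simp only [quoteIdxs]
      split
      · rw [List.dropWhile_cons]
        have : (decide (i < i + 1 + k')) = true := by simp; omega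
        rw [this]
        simp only [if_true]
      · rfl

theorem find_go_quote : ∀ (l : List Char) (k : Nat),
    PySem.Chars.find.go ['"'] l k = (((quoteIdxs l k).head?).map (fun p => (p : Int))).getD (-1) := by
  intro l
  induction l with
  | nil => intro k; simp [PySem.Chars.find.go, quoteIdxs]
  | cons c t ih =>
    intro k
    rw [show PySem.Chars.find.go ['"'] (c :: t) k
        = if List.isPrefixOf ['"'] (c :: t) then (k : Int) else PySem.Chars.find.go ['"'] t (k + 1) from rfl]
    simp only [quoteIdxs, List.isPrefixOf, Bool.and_true]
    by_cases hc : c = '"'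
    · simp [hc]
    · have hne : ('"' == c) = false := by simp only [beq_eq_false_iff_ne]; exact fun h => hc h.symm
      rw [hne, if_neg (by simp), if_neg hc]
      exact ih (k + 1)

theorem find_quote (l : List Char) :
    PySem.Chars.find l ['"'] = (((quoteIdxs l 0).head?).map (fun p => (p : Int))).getD (-1) := by
  simpa [PySem.Chars.find] using find_go_quote l 0

theorem findFrom_quote (l : List Char) (k : Nat) (hk : k ≤ l.length) :
    PySem.Chars.findFrom l ['"'] (k : Int) none =
      ((((quoteIdxs l 0).dropWhile (fun q => decide (q < k))).head?).map (fun p => (p : Int))).getD (-1) := by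
  rw [PySem.Chars.findFrom_natCast l ['"'] k hk, find_quote (l.drop k)]
  have hmap : (quoteIdxs (l.drop k) 0).map (· + k)
      = (quoteIdxs l 0).dropWhile (fun q => decide (q < k)) := by
    have h1 := quoteIdxs_shift (l.drop k) k 0
    have h2 := quoteIdxs_drop l 0 k
    simp only [Nat.add_zero, Nat.zero_add] at h1 h2
    rw [← h1, h2]
  set D := (quoteIdxs l 0).dropWhile (fun q => decide (q < k)) with hD
  rcases hQ : quoteIdxs (l.drop k) 0 with _ | ⟨q0, qt⟩
  · rw [hQ] at hmap
    simp only [List.map_nil] at hmap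
    rw [← hmap]
    simp
  · rw [hQ] at hmap
    have hhead : D.head? = some (q0 + k) := by rw [← hmap]; rfl
    rcases hDl : D with _ | ⟨d0, dt⟩
    · rw [hDl] at hhead; simp at hhead
    · rw [hDl] at hhead
      simp only [List.head?_cons, Option.some.injEq] at hhead
      simp only [List.head?_cons, Option.bind_some, Option.map_some, Option.getD_some,
        Option.bind_eq_bind, Option.pure_def]
      rw [if_neg (by omega)]
      omega

theorem foldA : ∀ (l : List Char) (i c : Nat) (d f : Int),
    (PySem.List.enumerate l (i : Int)).foldl
      (fun (st : Int × Int × Int) (ic : Int × Char) =>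
        if ic.2 == '"' then
          let compteur := st.1 + 1
          let debut := if compteur == 3 then ic.1 + 1 else st.2.1
          let fin := if compteur == 4 then ic.1 else st.2.2
          (compteur, debut, fin)
        else st) ((c : Int), d, f)
    = (((c : Int) + (quoteIdxs l i).length),
       (if c ≤ 2 then (((quoteIdxs l i)[2 - c]? : Option Nat).map (fun p => (p : Int) + 1)).getD d else d),
       (if c ≤ 3 then (((quoteIdxs l i)[3 - c]? : Option Nat).map (fun p => (p : Int))).getD f else f)) := by
  intro l
  induction l with
  | nil =>
    intro i c d f
    simp [quoteIdxs, PySem.List.enumerate]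
  | cons x t ih =>
    intro i c d f
    rw [PySem.List.enumerate_cons]
    simp only [List.foldl_cons]
    by_cases hx : x = '"'
    · simp only [hx, beq_self_eq_true, if_true]
      have hi : (i : Int) + 1 = ((i + 1 : Nat) : Int) := by push_cast; ring
      have hc : (c : Int) + 1 = ((c + 1 : Nat) : Int) := by push_cast; ring
      have h3 : ((c : Int) + 1 == 3) = (c + 1 == 3) := by
        rcases Bool.eq_false_or_eq_true (c + 1 == 3) with h | h <;>
          · rw [h]; simp only [beq_iff_eq, beq_eq_false_iff_ne] at *; omega
      have h4 : ((c : Int) + 1 == 4) = (c + 1 == 4) := by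
        rcases Bool.eq_false_or_eq_true (c + 1 == 4) with h | h <;>
          · rw [h]; simp only [beq_iff_eq, beq_eq_false_iff_ne] at *; omega
      rw [h3, h4, hc, hi, ih (i + 1) (c + 1)]
      simp only [quoteIdxs, if_true, List.length_cons, Prod.mk.injEq]
      rcases c with _ | _ | _ | _ | c <;>
        · refine ⟨by push_cast; ring, ?_, ?_⟩ <;>
            simp <;> (try push_cast) <;> (try ring_nf) <;> (try simp) <;> (try omega)
    · have hbx : (x == '"') = false := by simp [hx]
      simp only [hbx, Bool.false_eq_true, if_false]
      have hi : (i : Int) + 1 = ((i + 1 : Nat) : Int) := by push_cast; ring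
      rw [hi, ih (i + 1) c, quoteIdxs]
      simp [hx]

theorem portA_eq (ligne : String) :
    extraire_path_dans_ligne ligne = specOf (quoteIdxs ligne.toList 0) := by
  unfold extraire_path_dans_ligne
  have h := foldA ligne.toList 0 0 0 0
  simp only [Nat.cast_zero] at h
  rw [h]
  simp [specOf]

theorem portB_eq (ligne : String) :
    extraire_path_dans_ligne_alt ligne = specOf (quoteIdxs ligne.toList 0) := by
  unfold extraire_path_dans_ligne_alt
  simp only [PySem.Str.find_eq, PySem.Str.findFrom_eq, show ("\"").toList = ['"'] from rfl]
  set l := ligne.toList with hl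
  have hfind := find_quote l
  have hlt := quoteIdxs_lt l 0
  have hsort := quoteIdxs_sorted l 0
  simp only [Nat.zero_add] at hlt
  rcases hP : quoteIdxs l 0 with _ | ⟨p0, _ | ⟨p1, _ | ⟨p2, _ | ⟨p3, rest⟩⟩⟩⟩ <;>
    rw [hP] at hfind hlt hsort <;>
    simp only [List.head?_cons, List.head?_nil, Option.map_some, Option.getD_some,
      Option.map_none, Option.getD_none, Option.bind_eq_bind, Option.bind_some,
      Option.bind_none, Option.pure_def] at hfind
  · -- no quotes
    simp [hfind, specOf]
  · -- one quote
    have h0 : p0 < l.length := hlt p0 (by simp)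
    have e1 : List.dropWhile (fun q => decide (q < p0 + 1)) [p0] = [] := by
      simp only [List.dropWhile_cons, decide_eq_true_eq]
      rw [if_pos (by omega)]; rfl
    have Hq2 : PySem.Chars.findFrom l ['"'] ((p0 : Int) + 1) none = -1 := by
      rw [show ((p0 : Int) + 1) = ((p0 + 1 : Nat) : Int) from by push_cast; ring,
        findFrom_quote l (p0 + 1) (by omega), hP, e1]; rfl
    simp [hfind, Hq2, specOf]
  · -- two quotes
    have h0 : p0 < l.length := hlt p0 (by simp)
    have h1 : p1 < l.length := hlt p1 (by simp)
    have hs01 : p0 < p1 := List.rel_of_pairwise_cons hsort (by simp)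
    have e1 : List.dropWhile (fun q => decide (q < p0 + 1)) [p0, p1] = [p1] := by
      simp only [List.dropWhile_cons, decide_eq_true_eq]
      rw [if_pos (by omega), if_neg (by omega)]
    have e2 : List.dropWhile (fun q => decide (q < p1 + 1)) [p0, p1] = [] := by
      simp only [List.dropWhile_cons, decide_eq_true_eq]
      rw [if_pos (by omega), if_pos (by omega)]; rfl
    have Hq2 : PySem.Chars.findFrom l ['"'] ((p0 : Int) + 1) none = (p1 : Int) := by
      rw [show ((p0 : Int) + 1) = ((p0 + 1 : Nat) : Int) from by push_cast; ring,
        findFrom_quote l (p0 + 1) (by omega), hP, e1]; simp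
    have Hq3 : PySem.Chars.findFrom l ['"'] ((p1 : Int) + 1) none = -1 := by
      rw [show ((p1 : Int) + 1) = ((p1 + 1 : Nat) : Int) from by push_cast; ring,
        findFrom_quote l (p1 + 1) (by omega), hP, e2]; rfl
    simp [hfind, Hq2, Hq3, specOf]
  · -- three quotes
    have h0 : p0 < l.length := hlt p0 (by simp)
    have h1 : p1 < l.length := hlt p1 (by simp)
    have h2 : p2 < l.length := hlt p2 (by simp)
    have hs01 : p0 < p1 := List.rel_of_pairwise_cons hsort (by simp)
    have hs12 : p1 < p2 := List.rel_of_pairwise_cons (List.Pairwise.of_cons hsort) (by simp)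
    have e1 : List.dropWhile (fun q => decide (q < p0 + 1)) [p0, p1, p2] = [p1, p2] := by
      simp only [List.dropWhile_cons, decide_eq_true_eq]
      rw [if_pos (by omega), if_neg (by omega)]
    have e2 : List.dropWhile (fun q => decide (q < p1 + 1)) [p0, p1, p2] = [p2] := by
      simp only [List.dropWhile_cons, decide_eq_true_eq]
      rw [if_pos (by omega), if_pos (by omega), if_neg (by omega)]
    have e3 : List.dropWhile (fun q => decide (q < p2 + 1)) [p0, p1, p2] = [] := by
      simp only [List.dropWhile_cons, decide_eq_true_eq]
      rw [if_pos (by omega), if_pos (by omega), if_pos (by omega)]; rfl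
    have Hq2 : PySem.Chars.findFrom l ['"'] ((p0 : Int) + 1) none = (p1 : Int) := by
      rw [show ((p0 : Int) + 1) = ((p0 + 1 : Nat) : Int) from by push_cast; ring,
        findFrom_quote l (p0 + 1) (by omega), hP, e1]; simp
    have Hq3 : PySem.Chars.findFrom l ['"'] ((p1 : Int) + 1) none = (p2 : Int) := by
      rw [show ((p1 : Int) + 1) = ((p1 + 1 : Nat) : Int) from by push_cast; ring,
        findFrom_quote l (p1 + 1) (by omega), hP, e2]; simp
    have Hq4 : PySem.Chars.findFrom l ['"'] ((p2 : Int) + 1) none = -1 := by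
      rw [show ((p2 : Int) + 1) = ((p2 + 1 : Nat) : Int) from by push_cast; ring,
        findFrom_quote l (p2 + 1) (by omega), hP, e3]; rfl
    simp [hfind, Hq2, Hq3, Hq4, specOf]
  · -- four or more quotes
    have h0 : p0 < l.length := hlt p0 (by simp)
    have h1 : p1 < l.length := hlt p1 (by simp)
    have h2 : p2 < l.length := hlt p2 (by simp)
    have h3 : p3 < l.length := hlt p3 (by simp)
    have hs01 : p0 < p1 := List.rel_of_pairwise_cons hsort (by simp)
    have hs12 : p1 < p2 := List.rel_of_pairwise_cons (List.Pairwise.of_cons hsort) (by simp)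
    have hs23 : p2 < p3 :=
      List.rel_of_pairwise_cons (List.Pairwise.of_cons (List.Pairwise.of_cons hsort)) (by simp)
    have e1 : List.dropWhile (fun q => decide (q < p0 + 1)) (p0 :: p1 :: p2 :: p3 :: rest)
        = p1 :: p2 :: p3 :: rest := by
      simp only [List.dropWhile_cons, decide_eq_true_eq]
      rw [if_pos (by omega), if_neg (by omega)]
    have e2 : List.dropWhile (fun q => decide (q < p1 + 1)) (p0 :: p1 :: p2 :: p3 :: rest)
        = p2 :: p3 :: rest := by
      simp only [List.dropWhile_cons, decide_eq_true_eq]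
      rw [if_pos (by omega), if_pos (by omega), if_neg (by omega)]
    have e3 : List.dropWhile (fun q => decide (q < p2 + 1)) (p0 :: p1 :: p2 :: p3 :: rest)
        = p3 :: rest := by
      simp only [List.dropWhile_cons, decide_eq_true_eq]
      rw [if_pos (by omega), if_pos (by omega), if_pos (by omega), if_neg (by omega)]
    have Hq2 : PySem.Chars.findFrom l ['"'] ((p0 : Int) + 1) none = (p1 : Int) := by
      rw [show ((p0 : Int) + 1) = ((p0 + 1 : Nat) : Int) from by push_cast; ring,
        findFrom_quote l (p0 + 1) (by omega), hP, e1]; simp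
    have Hq3 : PySem.Chars.findFrom l ['"'] ((p1 : Int) + 1) none = (p2 : Int) := by
      rw [show ((p1 : Int) + 1) = ((p1 + 1 : Nat) : Int) from by push_cast; ring,
        findFrom_quote l (p1 + 1) (by omega), hP, e2]; simp
    have Hq4 : PySem.Chars.findFrom l ['"'] ((p2 : Int) + 1) none = (p3 : Int) := by
      rw [show ((p2 : Int) + 1) = ((p2 + 1 : Nat) : Int) from by push_cast; ring,
        findFrom_quote l (p2 + 1) (by omega), hP, e3]; simp
    simp [hfind, Hq2, Hq3, Hq4, specOf]

-- ===== VERDICT (by name: the statement is the Claim_ definition above) =====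
theorem extraire_path_dans_ligne_spec : Claim_equal_extraire_path_dans_ligne := by
  intro ligne _
  unfold Spec_extraire_path_dans_ligne
  rw [portA_eq, portB_eq]
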